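-- pv_equiv track=rewrite | github.com/shabb5020/master_thesis | finetuning/.ipynb_checkpoints/utils-checkpoint.py | generate_titles
-- ===== SOURCE A (Python) =====
-- def generate_titles(brands, categories, colors):
--
--     titles = []
--     i=j=k=0
--
--     for i in range(len(brands)):
--         for j in range(len(categories)):
--             for k in range(len(colors)):
--                 titles.append(brands[i] + " | " + categories[j] + " | " + colors[k])
--
--     return titles
-- ===== SOURCE B (Python) =====
-- def generate_titles(brands, categories, colors):
--     # Iterative depth-first search with an explicit stack: each stack entry is a
--     # partial title plus the list of levels still to be appended. Children are
--     # pushed in reverse so that popping yields A's output order.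
--     out = []
--     stack = [(b, [categories, colors]) for b in reversed(brands)]
--     while stack:
--         prefix, rest = stack.pop()
--         if not rest:
--             out.append(prefix)
--         else:
--             head, tail = rest[0], rest[1:]
--             for item in reversed(head):
--                 stack.append((prefix + " | " + item, tail))
--     return out
-- ===== Notes on version B (the rewrite author's own statement) =====
-- stated objective: alternative
-- what changed: Replaces the triple nested index loop by an iterative depth-first search over an explicit stack of (partial title, remaining levels) pairs, pushing children in reverse so pops reproduce A's order.
import Mathlib
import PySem

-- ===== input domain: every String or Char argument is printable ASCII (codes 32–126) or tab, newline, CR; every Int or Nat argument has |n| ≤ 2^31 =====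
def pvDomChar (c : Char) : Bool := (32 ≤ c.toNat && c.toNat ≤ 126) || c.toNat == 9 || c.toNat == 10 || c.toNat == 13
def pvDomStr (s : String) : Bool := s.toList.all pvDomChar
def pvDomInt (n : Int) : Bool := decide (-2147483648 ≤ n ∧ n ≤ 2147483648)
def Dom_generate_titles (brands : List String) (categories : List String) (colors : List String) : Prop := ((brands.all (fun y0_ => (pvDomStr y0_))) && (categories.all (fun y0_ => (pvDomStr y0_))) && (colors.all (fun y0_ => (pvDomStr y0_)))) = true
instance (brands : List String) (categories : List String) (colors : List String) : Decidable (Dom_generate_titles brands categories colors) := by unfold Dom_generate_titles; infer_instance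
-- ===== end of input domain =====

-- B replaces A's triple nested index loop by an iterative depth-first search over an
-- explicit stack of (partial title, remaining levels) pairs ("alternative").

-- ===== PORT A =====
-- triple nested for-loops over range(len(...)), indexing with xs[i] (always in range here)
def generate_titles (brands : List String) (categories : List String) (colors : List String) : List String :=
  (PySem.List.pyRange 0 (PySem.List.len brands) 1).foldl (fun titles i =>
    (PySem.List.pyRange 0 (PySem.List.len categories) 1).foldl (fun titles j =>
      (PySem.List.pyRange 0 (PySem.List.len colors) 1).foldl (fun titles k =>
        titles ++ [PySem.List.pyGetD brands i "" ++ " | " ++ PySem.List.pyGetD categories j "" ++ " | " ++ PySem.List.pyGetD colors k ""]) titles) titles) []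

-- ===== PORT B =====
-- The Python stack is a list popped at its END; it is modelled here with the top of
-- the stack at the HEAD of the Lean list, so Python's `stack.append` in a loop becomes
-- a foldl that conses, and the initial list comprehension is reversed once more.
-- Termination measure for the while loop: total weight of the stack, where an entry
-- with remaining levels `rest` weighs 1 + |rest₀|·(1 + |rest₁|·(…)).
def pvWeight : List (List String) → Nat
  | [] => 1
  | h :: t => 1 + h.length * pvWeight t

def pvStackW (st : List (String × List (List String))) : Nat :=
  (st.map (fun e => pvWeight e.2)).sum

-- the inner for-loop of Source B: push one child per item of `h` (in reversed order)
def pvPush (p : String) (t : List (List String)) (h : List String)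
    (st : List (String × List (List String))) : List (String × List (List String)) :=
  h.reverse.foldl (fun s item => (p ++ " | " ++ item, t) :: s) st

theorem pvStackW_push (h : List String) (t : List (List String))
    (f : String → String) (st : List (String × List (List String))) :
    pvStackW (h.foldl (fun s item => (f item, t) :: s) st)
      = h.length * pvWeight t + pvStackW st := by
  induction h generalizing st with
  | nil => simp [pvStackW]
  | cons x h ih =>
      rw [List.foldl_cons, ih]
      simp only [pvStackW, List.map_cons, List.sum_cons, List.length_cons, Nat.succ_mul]
      omega

theorem pvStackW_pvPush_lt (p : String) (h : List String) (t : List (List String))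
    (st : List (String × List (List String))) :
    pvStackW (pvPush p t h st) < pvStackW ((p, h :: t) :: st) := by
  unfold pvPush
  rw [pvStackW_push]
  simp only [List.length_reverse, pvStackW, List.map_cons, List.sum_cons, pvWeight]
  omega

-- the while loop of Source B
def pvLoop : List (String × List (List String)) → List String → List String
  | [], out => out
  | (p, []) :: st, out => pvLoop st (out ++ [p])
  | (p, h :: t) :: st, out => pvLoop (pvPush p t h st) out
termination_by st _ => pvStackW st
decreasing_by
  · simp [pvStackW, pvWeight]
  · exact pvStackW_pvPush_lt p h t st

def generate_titles_alt (brands : List String) (categories : List String) (colors : List String) : List String :=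
  pvLoop ((brands.reverse.map (fun b => (b, [categories, colors]))).reverse) []

-- ===== PRECONDITION & SPEC =====
def Spec_generate_titles (brands : List String) (categories : List String) (colors : List String) (out : List String) : Prop := out = generate_titles_alt brands categories colors
instance (brands : List String) (categories : List String) (colors : List String) (out : List String) : Decidable (Spec_generate_titles brands categories colors out) := by unfold Spec_generate_titles; infer_instance

-- ===== CLAIM (what is proved, stated in full; the proofs are below) =====
def Claim_equal_generate_titles : Prop := ∀ (brands : List String) (categories : List String) (colors : List String), Dom_generate_titles brands categories colors → Spec_generate_titles brands categories colors (generate_titles brands categories colors)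

-- ===== LEMMAS AND PROOFS =====

-- the titles a single stack entry eventually contributes
def pvExpand : List (List String) → String → List String
  | [], p => [p]
  | h :: t, p => h.flatMap (fun item => pvExpand t (p ++ " | " ++ item))

theorem pvFoldl_cons_reverse {α β : Type} (l : List α) (g : α → β) (st : List β) :
    l.reverse.foldl (fun s x => g x :: s) st = l.map g ++ st := by
  induction l generalizing st with
  | nil => simp
  | cons x l ih => simp [List.foldl_append, ih]

-- loop invariant: pvLoop flushes each stack entry's expansion, in stack order
theorem pvLoop_eq (st : List (String × List (List String))) (out : List String) :
    pvLoop st out = out ++ st.flatMap (fun e => pvExpand e.2 e.1) := by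
  fun_induction pvLoop st out with
  | case1 out => simp
  | case2 p st out ih => simp [ih, pvExpand]
  | case3 p h t st out ih =>
      rw [ih]
      unfold pvPush
      rw [pvFoldl_cons_reverse]
      simp [pvExpand, List.flatMap_append, List.flatMap_map]

-- innermost loop of A: append one title per color
theorem inner_colors (colors : List String) (p : String) (acc : List String) :
    (PySem.List.pyRange 0 (PySem.List.len colors) 1).foldl (fun titles k =>
      titles ++ [p ++ " | " ++ PySem.List.pyGetD colors k ""]) acc
    = acc ++ colors.map (fun col => p ++ " | " ++ col) := by
  rw [PySem.List.foldl_pyRange_zero_pyGetD colors "" (fun titles col => titles ++ [p ++ " | " ++ col]) acc]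
  exact PySem.List.foldl_append_singleton_eq_map _ _ _

theorem mid_categories (categories colors : List String) (b : String) (acc : List String) :
    (PySem.List.pyRange 0 (PySem.List.len categories) 1).foldl (fun titles j =>
      (PySem.List.pyRange 0 (PySem.List.len colors) 1).foldl (fun titles k =>
        titles ++ [b ++ " | " ++ PySem.List.pyGetD categories j "" ++ " | " ++ PySem.List.pyGetD colors k ""]) titles) acc
    = acc ++ categories.flatMap (fun c => colors.map (fun col => b ++ " | " ++ c ++ " | " ++ col)) := by
  rw [PySem.List.foldl_pyRange_zero_pyGetD categories ""
    (fun titles c => (PySem.List.pyRange 0 (PySem.List.len colors) 1).foldl (fun titles k =>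
        titles ++ [b ++ " | " ++ c ++ " | " ++ PySem.List.pyGetD colors k ""]) titles) acc]
  simp only [inner_colors]
  rw [PySem.List.foldl_append_eq_flatMap]

theorem generate_titles_eq (brands categories colors : List String) :
    generate_titles brands categories colors = generate_titles_alt brands categories colors := by
  unfold generate_titles generate_titles_alt
  rw [PySem.List.foldl_pyRange_zero_pyGetD brands ""
    (fun titles b => (PySem.List.pyRange 0 (PySem.List.len categories) 1).foldl (fun titles j =>
      (PySem.List.pyRange 0 (PySem.List.len colors) 1).foldl (fun titles k =>
        titles ++ [b ++ " | " ++ PySem.List.pyGetD categories j "" ++ " | " ++ PySem.List.pyGetD colors k ""]) titles) titles) []]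
  simp only [mid_categories]
  rw [PySem.List.foldl_append_eq_flatMap, pvLoop_eq]
  simp only [List.map_reverse, List.reverse_reverse, List.nil_append, List.flatMap_map]
  simp [pvExpand, String.append_assoc, List.map_eq_flatMap]

-- ===== VERDICT (by name: the statement is the Claim_ definition above) =====
theorem generate_titles_spec : Claim_equal_generate_titles := by
  intro brands categories colors _
  exact generate_titles_eq brands categories colors
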